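-- pv_equiv track=rewrite | github.com/GustavoOM/anima-desktop | opus-anima/raspberry/api/base.py | checksum_calc
-- ===== SOURCE A (Python) =====
-- def checksum_calc(msg):
--     msg_bytes = msg.encode("ascii")
--     sum = 0
--     block = 0
--     for i in range(len(msg_bytes)):
--         j = i % 4
--         if j == 0:
--             block = 0
--         block = block | msg_bytes[i] << 8*(3-j)
--         if j == 3:
--             sum = sum + block
--         if i == (len(msg_bytes) - 1) and j != 3:
--             block = block >> 8*(3-j)
--             sum = sum + block
--     return sum & int("0xFFFFFFFF", 16)
-- ===== SOURCE B (Python) =====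
-- def checksum_calc(msg):
--     data = msg.encode("ascii")
--     total = 0
--     for i in range(0, len(data), 4):
--         total += int.from_bytes(data[i:i+4], "big")
--     return total & 0xFFFFFFFF
-- ===== Notes on version B (the rewrite author's own statement) =====
-- stated objective: faster
-- what changed: A's per-byte loop with index-modulo bookkeeping, bit-or/shift block assembly and a partial-block right-shift fixup is replaced by a stride-4 loop that adds the big-endian integer value of each 4-byte slice to a running total; the short final slice needs no special case.
import Mathlib
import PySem

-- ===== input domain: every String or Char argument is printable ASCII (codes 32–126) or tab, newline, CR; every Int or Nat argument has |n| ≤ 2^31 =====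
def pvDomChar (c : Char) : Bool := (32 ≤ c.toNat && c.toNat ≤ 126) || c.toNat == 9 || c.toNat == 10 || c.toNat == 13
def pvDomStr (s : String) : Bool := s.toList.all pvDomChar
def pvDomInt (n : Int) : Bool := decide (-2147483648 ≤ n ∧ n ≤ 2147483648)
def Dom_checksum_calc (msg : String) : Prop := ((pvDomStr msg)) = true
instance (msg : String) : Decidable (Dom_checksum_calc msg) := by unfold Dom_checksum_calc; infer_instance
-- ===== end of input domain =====

-- B replaces A's per-byte index-modulo shift/or accumulation by a stride-4 loop adding the
-- big-endian value of each 4-byte slice: shorter and plainer, and measurably faster (constant factor).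

-- msg.encode("ascii"): the byte values of the characters (exact on the ASCII domain)
def pvBytes (msg : String) : List Int := msg.toList.map (fun c => (c.toNat : Int))

-- ===== PORT A =====
-- the 'for i in range(len(msg_bytes))' loop, as structural recursion over the byte list
-- carrying the index i and the constant n = len(msg_bytes)
def checksum_calc_loop (n : Int) (i : Int) (sum block : Int) : List Int → Int
  | [] => sum
  | b :: rest =>
    let j := PySem.Int.mod i 4
    let block := if j == 0 then (0 : Int) else block
    let block := PySem.Int.bor block (b <<< (8 * (3 - j)).toNat)
    let sum := if j == 3 then sum + block else sum
    let sum := if i == n - 1 && !(j == 3) then sum + (block >>> (8 * (3 - j)).toNat) else sum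
    checksum_calc_loop n (i + 1) sum block rest

def checksum_calc (msg : String) : Int :=
  -- int("0xFFFFFFFF", 16) = 4294967295 (exact: base-16 parse of the literal)
  PySem.Int.band (checksum_calc_loop ((pvBytes msg).length : Int) 0 0 0 (pvBytes msg)) 4294967295

-- ===== PORT B =====
-- int.from_bytes(chunk, "big")
def pvFromBytesBE (l : List Int) : Int := l.foldl (fun acc b => acc * 256 + b) 0

-- the 'for i in range(0, len(data), 4)' loop of Source B
def checksum_calc_alt (msg : String) : Int :=
  PySem.Int.band
    ((PySem.List.pyRange 0 ((pvBytes msg).length : Int) 4).foldl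
      (fun total i =>
        total + pvFromBytesBE (PySem.List.slice (pvBytes msg) (some i) (some (i + 4)))) 0)
    4294967295

-- ===== PRECONDITION & SPEC =====
def Spec_checksum_calc (msg : String) (out : Int) : Prop := out = checksum_calc_alt msg
instance (msg : String) (out : Int) : Decidable (Spec_checksum_calc msg out) := by unfold Spec_checksum_calc; infer_instance

-- ===== CLAIM (what is proved, stated in full; the proofs are below) =====
def Claim_equal_checksum_calc : Prop := ∀ (msg : String), Dom_checksum_calc msg → Spec_checksum_calc msg (checksum_calc msg)

-- ===== LEMMAS AND PROOFS =====

-- reference value: the sum of the big-endian 4-byte block values (last block may be short)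
def pvCsum : List Int → Int
  | [] => 0
  | [a] => a
  | [a, b] => a * 256 + b
  | [a, b, c] => (a * 256 + b) * 256 + c
  | a :: b :: c :: d :: rest => (((a * 256 + b) * 256 + c) * 256 + d) + pvCsum rest

theorem pv_nat_or_disj (m y k : Nat) (h : y < 2 ^ k) : (2 ^ k * m) ||| y = 2 ^ k * m + y := by
  apply Nat.eq_of_testBit_eq
  intro j
  rw [Nat.testBit_or, Nat.testBit_two_pow_mul, Nat.testBit_two_pow_mul_add m h]
  by_cases hj : j < k
  · have : ¬ (j ≥ k) := by omega
    simp [hj, this]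
  · have hk : j ≥ k := by omega
    have hy : y.testBit j = false :=
      Nat.testBit_lt_two_pow (lt_of_lt_of_le h (Nat.pow_le_pow_right (by norm_num) hk))
    simp [hj, hk, hy]

theorem pv_int_or_disj (x y : Int) (k : Nat) (hx : 0 ≤ x) (hd : (2 : Int) ^ k ∣ x)
    (hy0 : 0 ≤ y) (hy : y < 2 ^ k) : PySem.Int.bor x y = x + y := by
  rw [PySem.Int.bor_of_nonneg hx hy0]
  obtain ⟨m, hm⟩ := hd
  have hm0 : 0 ≤ m := by nlinarith [pow_pos (by norm_num : (0:Int) < 2) k]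
  have hx' : x = ((2 ^ k * m.toNat : Nat) : Int) := by
    push_cast
    rw [Int.toNat_of_nonneg hm0]
    exact hm
  have hxm : x.toNat = 2 ^ k * m.toNat := by
    rw [hx', Int.toNat_natCast]
  have hyk : y.toNat < 2 ^ k := by
    have : ((y.toNat : Int)) < ((2 ^ k : Nat) : Int) := by push_cast; omega
    exact_mod_cast this
  rw [hxm, pv_nat_or_disj _ _ _ hyk, ← hxm]
  push_cast
  omega

theorem pv_shl_eq (x : Int) (k : Nat) : x <<< k = x * 2 ^ k := Int.shiftLeft_eq x k

theorem pv_shr_mul (x : Int) (k : Nat) : (x * 2 ^ k) >>> k = x := by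
  rw [Int.shiftRight_eq_div_pow]
  push_cast
  exact Int.mul_ediv_cancel _ (by positivity)

theorem pv_bor0 (a : Int) : PySem.Int.bor 0 (a <<< (24 : Nat)) = a * 2 ^ 24 := by
  rw [PySem.Int.bor_comm, PySem.Int.bor_zero, pv_shl_eq]

theorem pv_borstep (x b : Int) (k : Nat) (hx : 0 ≤ x) (hd : (2 : Int) ^ (k + 8) ∣ x)
    (hbb : 0 ≤ b ∧ b < 256) : PySem.Int.bor x (b <<< k) = x + b * 2 ^ k := by
  rw [pv_shl_eq]
  apply pv_int_or_disj x _ (k + 8) hx hd (mul_nonneg hbb.1 (by positivity))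
  calc b * 2 ^ k < 256 * 2 ^ k := by
        have := hbb.2
        nlinarith [pow_pos (show (0:Int) < 2 by norm_num) k]
    _ = 2 ^ (k + 8) := by rw [pow_add]; ring

-- A's loop, one full block at a time, equals adding pvCsum
theorem loopA_eq (l : List Int) : ∀ (n i sum block : Int), n = i + l.length →
    (∀ b ∈ l, 0 ≤ b ∧ b < 256) → PySem.Int.mod i 4 = 0 →
    checksum_calc_loop n i sum block l = sum + pvCsum l := by
  induction l using pvCsum.induct with
  | case1 =>
    intro n i sum block hn hb hi
    simp [checksum_calc_loop, pvCsum]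
  | case2 a =>
    intro n i sum block hn hb hi
    have ha := hb a (by simp)
    have hi' : i % 4 = 0 := by rwa [PySem.Int.mod_eq_emod_of_pos (by norm_num)] at hi
    have d0 : (4:Int) ∣ i := by omega
    have e1 : (i == n - 1) = true := by simp at hn ⊢; omega
    simp only [checksum_calc_loop]
    simp [hi', e1]
    rw [pv_bor0 a, pv_shr_mul a 24]
    simp [pvCsum]
  | case3 a b =>
    intro n i sum block hn hb hi
    have ha := hb a (by simp); have hbB := hb b (by simp)
    have hi' : i % 4 = 0 := by rwa [PySem.Int.mod_eq_emod_of_pos (by norm_num)] at hi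
    have d0 : (4:Int) ∣ i := by omega
    have m1 : (i + 1) % 4 = 1 := by omega
    have e1 : (i == n - 1) = false := by simp at hn ⊢; omega
    have e2 : (i + 1 == n - 1) = true := by simp at hn ⊢; omega
    simp only [checksum_calc_loop]
    simp [hi', m1, e1, e2]
    rw [pv_bor0 a]
    rw [pv_borstep (a * 2 ^ 24) b 16 (mul_nonneg ha.1 (by positivity)) ⟨a, by ring⟩ hbB]
    rw [show a * 2 ^ 24 + b * 2 ^ 16 = (a * 256 + b) * 2 ^ 16 by ring, pv_shr_mul]
    simp [pvCsum]
  | case4 a b c =>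
    intro n i sum block hn hb hi
    have ha := hb a (by simp); have hbB := hb b (by simp); have hc := hb c (by simp)
    have hi' : i % 4 = 0 := by rwa [PySem.Int.mod_eq_emod_of_pos (by norm_num)] at hi
    have d0 : (4:Int) ∣ i := by omega
    have m1 : (i + 1) % 4 = 1 := by omega
    have m2 : (i + 1 + 1) % 4 = 2 := by omega
    have e1 : (i == n - 1) = false := by simp at hn ⊢; omega
    have e2 : (i + 1 == n - 1) = false := by simp at hn ⊢; omega
    have e3 : (i + 1 + 1 == n - 1) = true := by simp at hn ⊢; omega
    simp only [checksum_calc_loop]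
    simp [hi', m1, m2, e1, e2, e3]
    rw [pv_bor0 a]
    rw [pv_borstep (a * 2 ^ 24) b 16 (mul_nonneg ha.1 (by positivity)) ⟨a, by ring⟩ hbB]
    rw [pv_borstep (a * 2 ^ 24 + b * 2 ^ 16) c 8
      (add_nonneg (mul_nonneg ha.1 (by positivity)) (mul_nonneg hbB.1 (by positivity)))
      ⟨a * 2 ^ 8 + b, by ring⟩ hc]
    rw [show a * 2 ^ 24 + b * 2 ^ 16 + c * 2 ^ 8 = ((a * 256 + b) * 256 + c) * 2 ^ 8 by ring,
        pv_shr_mul]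
    simp [pvCsum]
  | case5 a b c d rest ih =>
    intro n i sum block hn hb hi
    have ha := hb a (by simp); have hbB := hb b (by simp)
    have hc := hb c (by simp); have hd := hb d (by simp)
    have hi' : i % 4 = 0 := by rwa [PySem.Int.mod_eq_emod_of_pos (by norm_num)] at hi
    have d0 : (4:Int) ∣ i := by omega
    have m1 : (i + 1) % 4 = 1 := by omega
    have m2 : (i + 1 + 1) % 4 = 2 := by omega
    have m3 : (i + 1 + 1 + 1) % 4 = 3 := by omega
    have e1 : (i == n - 1) = false := by simp at hn ⊢; omega
    have e2 : (i + 1 == n - 1) = false := by simp at hn ⊢; omega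
    have e3 : (i + 1 + 1 == n - 1) = false := by simp at hn ⊢; omega
    simp only [checksum_calc_loop]
    simp [hi', m1, m2, m3, e1, e2, e3]
    rw [pv_bor0 a]
    rw [pv_borstep (a * 2 ^ 24) b 16 (mul_nonneg ha.1 (by positivity)) ⟨a, by ring⟩ hbB]
    rw [pv_borstep (a * 2 ^ 24 + b * 2 ^ 16) c 8
      (add_nonneg (mul_nonneg ha.1 (by positivity)) (mul_nonneg hbB.1 (by positivity)))
      ⟨a * 2 ^ 8 + b, by ring⟩ hc]
    rw [pv_int_or_disj (a * 2 ^ 24 + b * 2 ^ 16 + c * 2 ^ 8) d 8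
      (add_nonneg (add_nonneg (mul_nonneg ha.1 (by positivity)) (mul_nonneg hbB.1 (by positivity)))
        (mul_nonneg hc.1 (by positivity)))
      ⟨a * 2 ^ 16 + b * 2 ^ 8 + c, by ring⟩ hd.1 (by have h := hd.2; norm_num; omega)]
    rw [ih n (i + 1 + 1 + 1 + 1)
      (sum + (a * 2 ^ 24 + b * 2 ^ 16 + c * 2 ^ 8 + d)) _
      (by simp at hn ⊢; omega)
      (fun x hx => hb x (by simp [hx]))
      (by rw [PySem.Int.mod_eq_emod_of_pos (by norm_num)]; omega)]
    simp [pvCsum]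
    ring

-- number of 4-byte chunks, ceil(L/4)
def pvChunkIdx (L : Nat) : Nat := (((L : Int) + 3) / 4).toNat

theorem chunkFoldNat (data : List Int) : ∀ (total : Int),
    List.foldl (fun acc (k : Nat) => acc + pvFromBytesBE ((data.drop (4 * k)).take 4)) total
      (List.range (pvChunkIdx data.length)) = total + pvCsum data := by
  induction data using pvCsum.induct with
  | case1 => intro total; simp [pvChunkIdx, pvCsum]
  | case2 a =>
    intro total
    simp [pvChunkIdx, pvCsum, pvFromBytesBE, List.range_succ]
  | case3 a b =>
    intro total
    simp [pvChunkIdx, pvCsum, pvFromBytesBE, List.range_succ]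
  | case4 a b c =>
    intro total
    simp [pvChunkIdx, pvCsum, pvFromBytesBE, List.range_succ]
  | case5 a b c d rest ih =>
    intro total
    have hidx : pvChunkIdx (a :: b :: c :: d :: rest).length = pvChunkIdx rest.length + 1 := by
      simp only [pvChunkIdx, List.length_cons]
      push_cast
      omega
    rw [hidx, List.range_succ_eq_map, List.foldl_cons, List.foldl_map]
    rw [PySem.List.foldl_congr_mem _ _
      (fun acc (k : Nat) => acc + pvFromBytesBE ((rest.drop (4 * k)).take 4)) _
      (by
        intro acc k _
        have h4 : 4 * (k + 1) = 4 * k + 1 + 1 + 1 + 1 := by omega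
        simp [h4, List.drop_succ_cons])]
    rw [ih]
    simp [pvCsum, pvFromBytesBE]
    ring

-- B's stride-4 fold equals pvCsum
theorem altFold_eq (data : List Int) :
    (PySem.List.pyRange 0 (data.length : Int) 4).foldl
      (fun total i => total + pvFromBytesBE (PySem.List.slice data (some i) (some (i + 4)))) 0
      = pvCsum data := by
  rw [PySem.List.pyRange_of_pos _ _ (by norm_num : (0:Int) < 4)]
  by_cases h : (0 : Int) < (data.length : Int)
  · rw [if_pos h, List.foldl_map]
    have hc : ((((data.length : Int) - 0 + 4 - 1) / 4).toNat) = pvChunkIdx data.length := by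
      simp only [pvChunkIdx]
      omega
    rw [hc]
    rw [PySem.List.foldl_congr_mem _ _
      (fun acc (k : Nat) => acc + pvFromBytesBE ((data.drop (4 * k)).take 4)) _
      (by
        intro acc k _
        have e1 : (0 : Int) + 4 * (k : Int) = ((4 * k : Nat) : Int) := by push_cast; ring
        have e2 : ((4 * k : Nat) : Int) + 4 = ((4 * k + 4 : Nat) : Int) := by push_cast; ring
        rw [e1, e2, PySem.List.slice_natCast]
        have e3 : (4 * k + 4) - 4 * k = 4 := by omega
        rw [e3])]
    simpa using chunkFoldNat data 0
  · have hnil : data = [] := by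
      have : data.length = 0 := by omega
      simpa using this
    simp [hnil, pvCsum]

-- ===== VERDICT (by name: the statement is the Claim_ definition above) =====
theorem checksum_calc_spec : Claim_equal_checksum_calc := by
  intro msg hdom
  unfold Spec_checksum_calc checksum_calc checksum_calc_alt
  have hb : ∀ b ∈ pvBytes msg, 0 ≤ b ∧ b < 256 := by
    intro b hbm
    simp only [pvBytes, List.mem_map] at hbm
    obtain ⟨c, hc, rfl⟩ := hbm
    have := List.all_eq_true.mp hdom c hc
    simp [pvDomChar] at this
    omega
  have h1 : checksum_calc_loop ((pvBytes msg).length : Int) 0 0 0 (pvBytes msg)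
      = pvCsum (pvBytes msg) := by
    have := loopA_eq (pvBytes msg) ((pvBytes msg).length : Int) 0 0 0 (by simp) hb (by decide)
    simpa using this
  rw [h1, altFold_eq]
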